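-- pv_equiv track=rewrite | github.com/Deepak-DCB/MSK_RAG_Chatbot | Eval/eval_gold_reranked.py | hit_at_k_article
-- ===== SOURCE A (Python) =====
-- def hit_at_k_article(expected_src, aliases, metas, k):
--     seen = set()
--     ordered = []
--     for m in metas:
--         src = (m.get("source_relpath") or "").strip()
--         if src not in seen:
--             seen.add(src)
--             ordered.append(src)
--             if len(ordered) >= k:
--                 break
--     return any(expected_src in s or any(a in s for a in aliases or []) for s in ordered)
-- ===== SOURCE B (Python) =====
-- def hit_at_k_article(expected_src, aliases, metas, k):
--     # Single fused pass: dedup, match and top-k cutoff interleaved; no intermediate list.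
--     als = aliases or []
--     seen = set()
--     count = 0
--     for m in metas:
--         src = (m.get("source_relpath") or "").strip()
--         if src in seen:
--             continue
--         if expected_src in src or any(a in src for a in als):
--             return True
--         seen.add(src)
--         count += 1
--         if count >= k:
--             return False
--     return False
-- ===== Notes on version B (the rewrite author's own statement) =====
-- stated objective: alternative
-- what changed: B fuses A's two phases (build the list of first k distinct sources, then scan it for a match) into one pass that tests each new distinct source immediately, returning True on the first hit and False once k distinct non-matching sources are seen, never materialising the intermediate list.
import Mathlib
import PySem

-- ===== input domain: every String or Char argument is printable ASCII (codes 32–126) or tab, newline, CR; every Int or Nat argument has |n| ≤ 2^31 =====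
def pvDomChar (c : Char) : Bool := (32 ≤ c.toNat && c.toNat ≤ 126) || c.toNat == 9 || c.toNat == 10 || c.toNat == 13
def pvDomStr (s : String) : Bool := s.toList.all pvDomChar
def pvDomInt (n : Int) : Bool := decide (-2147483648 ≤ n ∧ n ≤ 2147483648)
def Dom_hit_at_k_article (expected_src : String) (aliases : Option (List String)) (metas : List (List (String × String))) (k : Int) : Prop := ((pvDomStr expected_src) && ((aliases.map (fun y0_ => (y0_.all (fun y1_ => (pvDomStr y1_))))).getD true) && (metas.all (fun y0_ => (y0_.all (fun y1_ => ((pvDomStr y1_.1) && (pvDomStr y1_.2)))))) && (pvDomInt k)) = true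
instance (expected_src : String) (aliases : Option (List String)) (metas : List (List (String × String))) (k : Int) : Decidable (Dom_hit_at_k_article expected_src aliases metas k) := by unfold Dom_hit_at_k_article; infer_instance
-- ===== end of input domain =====

-- B fuses A's two phases (collect first k distinct sources, then scan for a match)
-- into one pass that tests each new distinct source immediately (objective: alternative).


-- ===== PORT A =====
-- src = (m.get("source_relpath") or "").strip()   (shared by both Pythons, line for line)
def pvSrcOf (m : List (String × String)) : String :=
  PySem.Str.strip (match (PySem.Dict.mk m).get? "source_relpath" with
    | none => ""
    | some v => if v = "" then "" else v)

-- the for-loop of A: builds `ordered` (first distinct sources, break once len ≥ k)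
def pvBuildOrdered (metas : List (List (String × String))) (seen : PySem.Set String)
    (ordered : List String) (k : Int) : List String :=
  match metas with
  | [] => ordered
  | m :: rest =>
    let src := pvSrcOf m
    if PySem.Set.contains seen src then pvBuildOrdered rest seen ordered k
    else
      let seen' := PySem.Set.add seen src
      let ordered' := ordered ++ [src]
      if k ≤ (ordered'.length : Int) then ordered'
      else pvBuildOrdered rest seen' ordered' k

def hit_at_k_article (expected_src : String) (aliases : Option (List String)) (metas : List (List (String × String))) (k : Int) : Bool :=
  (pvBuildOrdered metas PySem.Set.empty [] k).any (fun s =>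
    PySem.Str.isIn expected_src s || (aliases.getD []).any (fun a => PySem.Str.isIn a s))

-- ===== PORT B =====
-- B's single fused loop: dedup, match test and top-k cutoff interleaved
def pvAltLoop (expected_src : String) (als : List String) (metas : List (List (String × String)))
    (seen : PySem.Set String) (count : Int) (k : Int) : Bool :=
  match metas with
  | [] => false
  | m :: rest =>
    let src := pvSrcOf m
    if PySem.Set.contains seen src then pvAltLoop expected_src als rest seen count k
    else if PySem.Str.isIn expected_src src || als.any (fun a => PySem.Str.isIn a src) then true
    else
      let count' := count + 1
      if k ≤ count' then false
      else pvAltLoop expected_src als rest (PySem.Set.add seen src) count' k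

def hit_at_k_article_alt (expected_src : String) (aliases : Option (List String)) (metas : List (List (String × String))) (k : Int) : Bool :=
  pvAltLoop expected_src (aliases.getD []) metas PySem.Set.empty 0 k

-- ===== PRECONDITION & SPEC =====
def Spec_hit_at_k_article (expected_src : String) (aliases : Option (List String)) (metas : List (List (String × String))) (k : Int) (out : Bool) : Prop := out = hit_at_k_article_alt expected_src aliases metas k
instance (expected_src : String) (aliases : Option (List String)) (metas : List (List (String × String))) (k : Int) (out : Bool) : Decidable (Spec_hit_at_k_article expected_src aliases metas k out) := by unfold Spec_hit_at_k_article; infer_instance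

-- ===== CLAIM (what is proved, stated in full; the proofs are below) =====
def Claim_equal_hit_at_k_article : Prop := ∀ (expected_src : String) (aliases : Option (List String)) (metas : List (List (String × String))) (k : Int), Dom_hit_at_k_article expected_src aliases metas k → Spec_hit_at_k_article expected_src aliases metas k (hit_at_k_article expected_src aliases metas k)

-- ===== LEMMAS AND PROOFS =====
-- Loop fusion invariant: scanning A's `ordered` after the build loop equals the matches
-- already found in the prefix `ordered` plus B's fused loop continued from the same state.
theorem pvFuse (expected_src : String) (als : List String)
    (metas : List (List (String × String))) (k : Int) :
    ∀ (seen : PySem.Set String) (ordered : List String),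
      (pvBuildOrdered metas seen ordered k).any (fun s =>
        PySem.Str.isIn expected_src s || als.any (fun a => PySem.Str.isIn a s))
      = (ordered.any (fun s =>
          PySem.Str.isIn expected_src s || als.any (fun a => PySem.Str.isIn a s))
        || pvAltLoop expected_src als metas seen (ordered.length : Int) k) := by
  induction metas with
  | nil => intro seen ordered; simp only [pvBuildOrdered, pvAltLoop, Bool.or_false]
  | cons m rest ih =>
    intro seen ordered
    simp only [pvBuildOrdered, pvAltLoop, List.length_append, List.length_cons,
      List.length_nil]
    push_cast
    by_cases hseen : PySem.Set.contains seen (pvSrcOf m) = true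
    · rw [if_pos hseen, if_pos hseen, ih]
    · rw [if_neg hseen, if_neg hseen]
      by_cases hk : k ≤ (ordered.length : Int) + 1
      · rw [if_pos hk, List.any_append, List.any_cons, List.any_nil]
        by_cases hp : (PySem.Str.isIn expected_src (pvSrcOf m)
            || als.any (fun a => PySem.Str.isIn a (pvSrcOf m))) = true
        · rw [if_pos hp]; simp only [hp, Bool.or_false, Bool.or_true]
        · rw [if_neg hp, if_pos hk]
          simp only [Bool.eq_false_iff.mpr hp, Bool.or_false]
      · rw [if_neg hk,
          ih (PySem.Set.add seen (pvSrcOf m)) (ordered ++ [pvSrcOf m]),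
          List.any_append, List.any_cons, List.any_nil, List.length_append,
          List.length_cons, List.length_nil, Nat.cast_add, Nat.cast_one]
        by_cases hp : (PySem.Str.isIn expected_src (pvSrcOf m)
            || als.any (fun a => PySem.Str.isIn a (pvSrcOf m))) = true
        · rw [if_pos hp]; simp only [hp, Bool.or_false, Bool.or_true, Bool.true_or]
        · rw [if_neg hp, if_neg hk]
          simp only [Bool.eq_false_iff.mpr hp, Bool.or_false]

-- ===== VERDICT (by name: the statement is the Claim_ definition above) =====
theorem hit_at_k_article_spec : Claim_equal_hit_at_k_article := by
  intro expected_src aliases metas k _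
  unfold Spec_hit_at_k_article hit_at_k_article hit_at_k_article_alt
  simpa using pvFuse expected_src (aliases.getD []) metas k PySem.Set.empty []
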